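-- pv_equiv track=rewrite | github.com/EAMahmoudi/binome-1 | activity-1.py | incr_char
-- ===== SOURCE A (Python) =====
-- def incr_char(String):
--     str = ""
--     for c in String:
--         if c.isalpha():
--             str += chr(ord(c) + 1)
--         else:
--             str += c
--     return str
-- ===== SOURCE B (Python) =====
-- def incr_char(String):
--     table = {ord(c): ord(c) + 1 for c in set(String) if c.isalpha()}
--     return String.translate(table)
-- ===== Notes on version B (the rewrite author's own statement) =====
-- stated objective: idiomatic
-- what changed: Replaces the character-by-character string-accumulation loop with a precomputed ord-keyed translation table built from set(String), applied in one str.translate pass.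
import Mathlib
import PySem

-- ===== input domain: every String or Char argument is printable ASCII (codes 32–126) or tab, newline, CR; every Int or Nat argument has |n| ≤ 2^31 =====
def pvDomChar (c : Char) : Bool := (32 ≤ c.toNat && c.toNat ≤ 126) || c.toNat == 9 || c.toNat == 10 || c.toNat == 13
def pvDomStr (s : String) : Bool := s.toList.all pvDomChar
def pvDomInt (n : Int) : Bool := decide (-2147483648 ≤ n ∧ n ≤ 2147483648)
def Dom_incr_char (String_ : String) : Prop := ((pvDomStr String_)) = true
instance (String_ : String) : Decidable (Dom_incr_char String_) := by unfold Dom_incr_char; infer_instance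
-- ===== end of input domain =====

-- B replaces A's character-by-character string-accumulation loop with a precomputed
-- ord-keyed translation table applied in a single translate pass (idiomatic).


-- ===== PORT A =====
-- str = ""; for c in String: str += chr(ord(c)+1) if c.isalpha() else c; return str
def incr_char (String_ : String) : String :=
  String.mk (String_.toList.foldl
    (fun acc c =>
      if PySem.Chars.isalpha c then acc ++ [Char.ofNat ((c.toNat : Int) + 1).toNat]
      else acc ++ [c])
    [])

-- ===== PORT B =====
-- table = {ord(c): ord(c)+1 for c in set(String) if c.isalpha()}; return String.translate(table)
def incr_char_alt (String_ : String) : String :=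
  let table : PySem.Dict Int Int :=
    (PySem.Set.ofList String_.toList).foldl
      (fun d c =>
        if PySem.Chars.isalpha c then d.insert (c.toNat : Int) ((c.toNat : Int) + 1)
        else d)
      PySem.Dict.empty
  String.mk (String_.toList.map (fun c =>
    match table.get? (c.toNat : Int) with
    | some v => Char.ofNat v.toNat
    | none => c))

-- ===== PRECONDITION & SPEC =====
def Spec_incr_char (String_ : String) (out : String) : Prop := out = incr_char_alt String_
instance (String_ : String) (out : String) : Decidable (Spec_incr_char String_ out) := by unfold Spec_incr_char; infer_instance

-- ===== CLAIM (what is proved, stated in full; the proofs are below) =====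
def Claim_equal_incr_char : Prop := ∀ (String_ : String), Dom_incr_char String_ → Spec_incr_char String_ (incr_char String_)

-- ===== LEMMAS AND PROOFS =====

theorem pv_ord_inj {c x : Char} (h : (c.toNat : Int) = (x.toNat : Int)) : c = x := by
  have h' : c.toNat = x.toNat := by exact_mod_cast h
  exact Char.ext (UInt32.toNat_inj.mp h')

-- table lookup characterisation: folding the filtered inserts over any char list
theorem pv_table_get (L : List Char) (d : PySem.Dict Int Int) (c : Char) :
    (L.foldl (fun d x =>
        if PySem.Chars.isalpha x then d.insert (x.toNat : Int) ((x.toNat : Int) + 1) else d)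
      d).get? (c.toNat : Int)
    = if PySem.Chars.isalpha c = true ∧ c ∈ L then some ((c.toNat : Int) + 1)
      else d.get? (c.toNat : Int) := by
  induction L generalizing d with
  | nil => simp
  | cons x L ih =>
    simp only [List.foldl_cons, ih]
    by_cases hmem : PySem.Chars.isalpha c = true ∧ c ∈ L
    · simp [hmem]
    · simp only [hmem, if_false]
      by_cases hx : PySem.Chars.isalpha x = true
      · rw [hx, if_pos rfl, PySem.Dict.get?_insert]
        by_cases hce : (c.toNat : Int) = (x.toNat : Int)
        · have hcx : c = x := pv_ord_inj hce
          subst hcx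
          simp [hx]
        · rw [if_neg hce]
          have hne : ¬ (PySem.Chars.isalpha c = true ∧ c ∈ x :: L) := by
            rintro ⟨ha, hm⟩
            rcases List.mem_cons.mp hm with rfl | hm
            · exact hce rfl
            · exact hmem ⟨ha, hm⟩
          rw [if_neg hne]
      · rw [if_neg hx]
        have hne : ¬ (PySem.Chars.isalpha c = true ∧ c ∈ x :: L) := by
          rintro ⟨ha, hm⟩
          rcases List.mem_cons.mp hm with rfl | hm
          · exact hx ha
          · exact hmem ⟨ha, hm⟩
        rw [if_neg hne]

-- ===== VERDICT (by name: the statement is the Claim_ definition above) =====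
theorem incr_char_spec : Claim_equal_incr_char := by
  intro S _
  unfold Spec_incr_char incr_char incr_char_alt
  have hA : S.toList.foldl
      (fun acc c =>
        if PySem.Chars.isalpha c then acc ++ [Char.ofNat ((c.toNat : Int) + 1).toNat]
        else acc ++ [c]) []
      = S.toList.map (fun c =>
          if PySem.Chars.isalpha c then Char.ofNat ((c.toNat : Int) + 1).toNat else c) := by
    have := PySem.List.foldl_append_singleton_eq_map
      (l := S.toList)
      (f := fun c => if PySem.Chars.isalpha c then Char.ofNat ((c.toNat : Int) + 1).toNat else c)
      (acc := ([] : List Char))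
    rw [List.nil_append] at this
    rw [← this]
    apply PySem.List.foldl_congr_mem
    intro acc x _
    by_cases h : PySem.Chars.isalpha x = true <;> simp [h]
  rw [hA]
  congr 1
  apply List.map_congr_left
  intro c hc
  have hmem : c ∈ PySem.Set.ofList S.toList := (PySem.Set.mem_ofList _ _).mpr hc
  rw [pv_table_get]
  by_cases h : PySem.Chars.isalpha c = true
  · simp [h, hmem]
  · simp [h]
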